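-- pv_equiv track=rewrite | github.com/Agraulis/python | python algorithms and data structures/homework2/task5.py | code_symbol
-- ===== SOURCE A (Python) =====
-- def code_symbol(start, stop):
--     line_break_needed = ''
--     if start > stop:
--         return 'error'
--     else:
--         if (stop - start) % 10 == 0:
--             line_break_needed = '\n'
--         if start == stop:
--             return f'{start}-{chr(start)}, {line_break_needed}'
--         else:
--             return f'{start}-{chr(start)}, {line_break_needed}{code_symbol(start + 1, stop)}'
-- ===== SOURCE B (Python) =====
-- def code_symbol(start, stop):
--     if start > stop:
--         return 'error'
--     parts = []
--     for i in range(start, stop + 1):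
--         parts.append(f'{i}-{chr(i)}, ')
--         if (stop - i) % 10 == 0:
--             parts.append('\n')
--     return ''.join(parts)
-- ===== Notes on version B (the rewrite author's own statement) =====
-- stated objective: alternative
-- what changed: Replaced A's deep tail recursion that builds the string by repeated f-string concatenation with a single left-to-right loop over range(start, stop+1) accumulating the pieces in a list joined once at the end (constant stack, one final join).
import Mathlib
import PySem

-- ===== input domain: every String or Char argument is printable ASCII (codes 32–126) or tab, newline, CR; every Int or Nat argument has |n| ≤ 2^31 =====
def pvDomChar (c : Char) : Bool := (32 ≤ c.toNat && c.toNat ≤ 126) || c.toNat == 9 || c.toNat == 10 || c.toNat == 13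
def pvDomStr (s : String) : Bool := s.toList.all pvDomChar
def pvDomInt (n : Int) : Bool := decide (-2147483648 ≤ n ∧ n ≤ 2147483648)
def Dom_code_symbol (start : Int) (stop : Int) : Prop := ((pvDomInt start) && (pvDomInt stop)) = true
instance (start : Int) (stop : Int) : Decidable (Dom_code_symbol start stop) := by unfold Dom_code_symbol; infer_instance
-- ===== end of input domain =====

-- B replaces A's deep tail recursion (quadratic repeated concatenation) with one loop over
-- range(start, stop+1) collecting the pieces in a list joined once at the end (objective: alternative decomposition, constant stack).

-- ===== PORT A =====
def code_symbol (start : Int) (stop : Int) : String :=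
  if start > stop then "error"
  else
    let line_break_needed : String := if PySem.Int.mod (stop - start) 10 = 0 then "\n" else ""
    if start = stop then
      PySem.Int.toStr start ++ "-" ++ String.ofList [Char.ofNat start.toNat] ++ ", " ++ line_break_needed
    else
      PySem.Int.toStr start ++ "-" ++ String.ofList [Char.ofNat start.toNat] ++ ", " ++ line_break_needed
        ++ code_symbol (start + 1) stop
termination_by (stop - start).toNat
decreasing_by omega

-- ===== PORT B =====
def code_symbol_alt (start : Int) (stop : Int) : String :=
  if start > stop then "error"
  else
    let parts := (PySem.List.pyRange start (stop + 1) 1).foldl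
      (fun acc i =>
        let acc2 := acc ++ [PySem.Int.toStr i ++ "-" ++ String.ofList [Char.ofNat i.toNat] ++ ", "]
        if PySem.Int.mod (stop - i) 10 = 0 then acc2 ++ ["\n"] else acc2) []
    PySem.Str.join "" parts

-- ===== PRECONDITION & SPEC =====
-- Pre_ excludes exactly the inputs where A raises or where the Python result is not a Lean String:
-- chr raises ValueError when the range reaches a code < 0 or > 0x10FFFF; A raises RecursionError
-- for ranges longer than CPython's recursion limit permits (length ≥ 997 at top level; bounded at
-- 900 so the raise threshold is cleared at any sampling call depth); and when the range meets the
-- surrogate block 0xD800–0xDFFF the Python value contains lone surrogates, code points a Lean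
-- Char/String cannot represent (ranges entirely above the block are admitted).
def Pre_code_symbol (start : Int) (stop : Int) : Prop :=
  start > stop ∨
    (0 ≤ start ∧ stop ≤ 1114111 ∧ (stop < 55296 ∨ 57343 < start) ∧ stop - start ≤ 900)
instance (start : Int) (stop : Int) : Decidable (Pre_code_symbol start stop) := by
  unfold Pre_code_symbol; infer_instance

def pvWitness_code_symbol : Int × Int := (60, 75)

def Spec_code_symbol (start : Int) (stop : Int) (out : String) : Prop := out = code_symbol_alt start stop
instance (start : Int) (stop : Int) (out : String) : Decidable (Spec_code_symbol start stop out) := by unfold Spec_code_symbol; infer_instance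

-- ===== CLAIM (what is proved, stated in full; the proofs are below) =====
def Claim_equal_code_symbol : Prop := ∀ (start : Int) (stop : Int), Dom_code_symbol start stop → Pre_code_symbol start stop → Spec_code_symbol start stop (code_symbol start stop)

-- ===== LEMMAS AND PROOFS =====

-- the characters contributed by index i (numeral, '-', the character, ", ", optional newline)
def pvEntry (stop i : Int) : List Char :=
  (PySem.Int.toStr i).toList ++ ['-', Char.ofNat i.toNat, ',', ' ']
    ++ (if PySem.Int.mod (stop - i) 10 = 0 then ['\n'] else [])

theorem pv_intercalate_nil (l : List (List Char)) : List.intercalate [] l = l.flatten := by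
  induction l with
  | nil => simp [List.intercalate]
  | cons p rest ih =>
    cases rest with
    | nil => simp [List.intercalate, List.intersperse]
    | cons q r =>
      rw [show List.intercalate ([] : List Char) (p :: q :: r)
            = p ++ [] ++ List.intercalate [] (q :: r) from PySem.Chars.join_cons_cons [] p q r]
      simp_all

theorem pv_join_empty (parts : List String) :
    (PySem.Str.join "" parts).toList = (parts.map String.toList).flatten := by
  show (String.ofList (PySem.Chars.join "".toList (parts.map String.toList))).toList = _
  have : ("" : String).toList = [] := by decide
  rw [this, show PySem.Chars.join = List.intercalate from rfl, pv_intercalate_nil]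
  simp

-- A's recursion produces, character for character, the concatenation of the entries of the range
theorem pv_codeA (n : Nat) : ∀ (start stop : Int), start ≤ stop → (stop - start).toNat = n →
    (code_symbol start stop).toList
      = ((PySem.List.pyRange start (stop + 1) 1).map (pvEntry stop)).flatten := by
  induction n with
  | zero =>
    intro start stop hle hn
    have heq : start = stop := by omega
    subst heq
    rw [code_symbol]
    simp only [show ¬ start > start by omega, if_false,
      PySem.List.pyRange_one_singleton _]
    simp only [List.map_cons, List.map_nil, List.flatten_cons, List.flatten_nil, pvEntry,
      List.append_nil]
    by_cases h : PySem.Int.mod (start - start) 10 = 0 <;>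
      simp [show ("-" : String).toList = ['-'] by decide,
        show (", " : String).toList = [',', ' '] by decide,
        show ("\n" : String).toList = ['\n'] by decide]
  | succ m ih =>
    intro start stop hle hn
    have hlt : start < stop := by omega
    rw [code_symbol]
    simp only [show ¬ start > stop by omega, if_false, show ¬ start = stop by omega, if_false]
    rw [PySem.List.pyRange_one_cons (show start < stop + 1 by omega)]
    simp only [List.map_cons, List.flatten_cons]
    have hrec := ih (start + 1) stop (by omega) (by omega)
    simp [hrec, pvEntry, show ("-" : String).toList = ['-'] by decide,
      show (", " : String).toList = [',', ' '] by decide]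
    split_ifs <;> decide

-- B's loop: the flattened character content of the accumulated list of pieces
theorem pv_foldB (stop : Int) (l : List Int) (acc : List String) :
    (((l.foldl
        (fun acc i =>
          let acc2 := acc ++ [PySem.Int.toStr i ++ "-" ++ String.ofList [Char.ofNat i.toNat] ++ ", "]
          if PySem.Int.mod (stop - i) 10 = 0 then acc2 ++ ["\n"] else acc2) acc)).map
        String.toList).flatten
      = ((acc.map String.toList).flatten) ++ (l.map (pvEntry stop)).flatten := by
  induction l generalizing acc with
  | nil => simp
  | cons i rest ih =>
    simp only [List.foldl_cons]
    rw [ih]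
    simp [pvEntry]
    split_ifs <;> simp

-- ===== VERDICT (by name: the statement is the Claim_ definition above) =====
theorem code_symbol_spec : Claim_equal_code_symbol := by
  intro start stop _ _
  unfold Spec_code_symbol
  by_cases hgt : start > stop
  · rw [code_symbol, code_symbol_alt]
    simp [hgt]
  · apply String.toList_inj.mp
    have hle : start ≤ stop := by omega
    rw [pv_codeA (stop - start).toNat start stop hle rfl]
    rw [code_symbol_alt]
    simp only [hgt, if_false]
    rw [pv_join_empty, pv_foldB]
    simp
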